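-- pv_equiv track=rewrite | github.com/U235a/chess4SK | chess4SK.py | get_images_name
-- ===== SOURCE A (Python) =====
-- def get_images_name(lines, page_ranges):
--     '''создание списка файлов изображений из spt'''
--     filelist = []
--     counter = 1
--     for line in lines:
--         if line[:9] == '[FFNAME]=':
--             if (counter in page_ranges) or page_ranges == []:
--                 filelist.append(line[9:-1])
--             counter += 1
--     return filelist
-- ===== SOURCE B (Python) =====
-- def get_images_name(lines, page_ranges):
--     '''index FFNAME payloads by 1-based page number in a dict, then look up the
--     requested pages in increasing order (all pages when page_ranges is empty)'''
--     pages = {}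
--     for line in lines:
--         if line.startswith('[FFNAME]='):
--             pages[len(pages) + 1] = line[9:-1]
--     if not page_ranges:
--         return list(pages.values())
--     return [pages[p] for p in sorted(set(page_ranges)) if p in pages]
-- ===== Notes on version B (the rewrite author's own statement) =====
-- stated objective: alternative
-- what changed: Replaces A's interleaved counter loop with list-membership tests by a hash index: one pass builds a dict from 1-based page number to FFNAME payload, then the answer is the dict's values (empty page_ranges) or lookups over sorted(set(page_ranges)), so no pass over the lines tests membership in page_ranges at all.
import Mathlib
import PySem

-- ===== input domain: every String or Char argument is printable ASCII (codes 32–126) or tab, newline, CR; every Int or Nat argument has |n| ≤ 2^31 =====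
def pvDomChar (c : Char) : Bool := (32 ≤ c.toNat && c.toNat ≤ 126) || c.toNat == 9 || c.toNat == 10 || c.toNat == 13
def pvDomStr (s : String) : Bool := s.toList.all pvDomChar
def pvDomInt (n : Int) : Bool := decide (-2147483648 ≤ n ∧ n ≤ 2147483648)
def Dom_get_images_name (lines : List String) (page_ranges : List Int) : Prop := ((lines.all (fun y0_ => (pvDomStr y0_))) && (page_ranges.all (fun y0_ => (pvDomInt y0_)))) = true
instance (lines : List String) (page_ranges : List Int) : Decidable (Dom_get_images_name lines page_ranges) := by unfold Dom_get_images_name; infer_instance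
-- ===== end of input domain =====

-- B replaces A's counter loop (which tests 'counter in page_ranges' per FFNAME line) by a dict
-- indexed by 1-based page number, queried along sorted(set(page_ranges)); objective: alternative.

-- ===== PORT A =====
-- single loop carrying (filelist, counter); counter advances only on FFNAME lines
def get_images_name (lines : List String) (page_ranges : List Int) : List String :=
  (lines.foldl
    (fun (st : List String × Int) line =>
      if PySem.Str.slice line none (some 9) == "[FFNAME]=" then
        if page_ranges.contains st.2 || page_ranges == [] then
          (st.1 ++ [PySem.Str.slice line (some 9) (some (-1))], st.2 + 1)
        else
          (st.1, st.2 + 1)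
      else st)
    ([], 1)).1

-- ===== PORT B =====
-- pass 1 builds pages : Dict (1-based page number ↦ payload); then values, or lookups
-- along sorted(set(page_ranges)) (filterMap get? = 'if p in pages' then 'pages[p]')
def get_images_name_alt (lines : List String) (page_ranges : List Int) : List String :=
  let pages : PySem.Dict Int String :=
    lines.foldl
      (fun (d : PySem.Dict Int String) line =>
        if PySem.Str.startswith line "[FFNAME]=" then
          d.insert ((d.size : Int) + 1) (PySem.Str.slice line (some 9) (some (-1)))
        else d)
      PySem.Dict.empty
  if page_ranges == [] then pages.values
  else
    (PySem.List.sorted (PySem.Set.ofList page_ranges) (fun x => x) false).filterMap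
      (fun p => pages.get? p)

-- ===== PRECONDITION & SPEC =====
def Spec_get_images_name (lines : List String) (page_ranges : List Int) (out : List String) : Prop := out = get_images_name_alt lines page_ranges
instance (lines : List String) (page_ranges : List Int) (out : List String) : Decidable (Spec_get_images_name lines page_ranges out) := by unfold Spec_get_images_name; infer_instance

-- ===== CLAIM (what is proved, stated in full; the proofs are below) =====
def Claim_equal_get_images_name : Prop := ∀ (lines : List String) (page_ranges : List Int), Dom_get_images_name lines page_ranges → Spec_get_images_name lines page_ranges (get_images_name lines page_ranges)

-- ===== LEMMAS AND PROOFS =====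

def pvIsFF (line : String) : Bool := PySem.Str.slice line none (some 9) == "[FFNAME]="

def pvPayload (line : String) : String := PySem.Str.slice line (some 9) (some (-1))

-- A's test 'line[:9] == "[FFNAME]="' and B's 'line.startswith("[FFNAME]=")' agree
theorem pvCond_eq (s : String) : pvIsFF s = PySem.Str.startswith s "[FFNAME]=" := by
  unfold pvIsFF
  rw [Bool.eq_iff_iff]
  have hsl : (PySem.Str.slice s none (some 9)).toList = s.toList.take 9 := by
    simp [pysem]
  have hlen : ("[FFNAME]=".toList).length = 9 := by decide
  have key : (PySem.Str.slice s none (some 9) = "[FFNAME]=") ↔ ("[FFNAME]=".toList <+: s.toList) := by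
    rw [List.prefix_iff_eq_take, hlen, ← hsl]
    constructor
    · intro h; rw [h]
    · intro h; exact (String.toList_inj.mp h).symm
  constructor
  · intro h; simp only [beq_iff_eq] at h
    simp only [PySem.Str.startswith_eq]; rw [PySem.Chars.startswith_iff]; exact key.mp h
  · intro h
    simp only [PySem.Str.startswith_eq] at h; rw [PySem.Chars.startswith_iff] at h
    simp only [beq_iff_eq]; exact key.mpr h

-- reference recursion: A's loop with the counter made explicit
def pvGo (page_ranges : List Int) : List String → Int → List String
  | [], _ => []
  | l :: ls, n =>
    if pvIsFF l then
      (if page_ranges.contains n || page_ranges == [] then [pvPayload l] else [])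
        ++ pvGo page_ranges ls (n + 1)
    else pvGo page_ranges ls n

theorem pvFoldl_eq_go (page_ranges : List Int) (lines : List String) :
    ∀ (acc : List String) (n : Int),
      (lines.foldl
        (fun (st : List String × Int) line =>
          if PySem.Str.slice line none (some 9) == "[FFNAME]=" then
            if page_ranges.contains st.2 || page_ranges == [] then
              (st.1 ++ [PySem.Str.slice line (some 9) (some (-1))], st.2 + 1)
            else
              (st.1, st.2 + 1)
          else st)
        (acc, n)).1 = acc ++ pvGo page_ranges lines n := by
  induction lines with
  | nil => intro acc n; simp [pvGo]
  | cons l ls ih =>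
    intro acc n
    simp only [List.foldl_cons, pvGo, pvIsFF, pvPayload]
    by_cases h1 : PySem.Str.slice l none (some 9) == "[FFNAME]="
    · simp only [h1, if_true]
      by_cases h2 : page_ranges.contains n || page_ranges == []
      · simp only [h2, if_true]
        rw [ih]
        simp
      · simp only [h2, Bool.false_eq_true, if_false]
        rw [ih]
        simp
    · simp only [h1, Bool.false_eq_true, if_false]
      exact ih acc n

theorem pvGo_empty (page_ranges : List Int) (h : page_ranges = []) (lines : List String) (n : Int) :
    pvGo page_ranges lines n = (lines.filter pvIsFF).map pvPayload := by
  subst h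
  induction lines generalizing n with
  | nil => simp [pvGo]
  | cons l ls ih =>
    simp only [pvGo, List.filter_cons]
    by_cases h1 : pvIsFF l
    · simp [h1, ih]
    · simp [h1, ih]

theorem pvGo_nonempty (page_ranges : List Int) (h : ¬ page_ranges = []) (lines : List String) (n : Int) :
    pvGo page_ranges lines n =
      (PySem.List.enumerate ((lines.filter pvIsFF).map pvPayload) n).filterMap
        (fun p => if page_ranges.contains p.1 then some p.2 else none) := by
  induction lines generalizing n with
  | nil => simp [pvGo]
  | cons l ls ih =>
    have hpe : (page_ranges == []) = false := by simp [h]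
    simp only [pvGo, List.filter_cons]
    by_cases h1 : pvIsFF l
    · simp only [h1, if_true, List.map_cons, PySem.List.enumerate_cons, List.filterMap_cons, hpe,
        Bool.or_false]
      by_cases h2 : n ∈ page_ranges
      · simp [h2, ih]
      · simp [h2, ih]
    · simp [h1, ih]

-- enumerate of a snoc
theorem pvEnum_snoc {α : Type} (xs : List α) (y : α) :
    ∀ (s : Int), PySem.List.enumerate (xs ++ [y]) s
      = PySem.List.enumerate xs s ++ [((s + xs.length : Int), y)] := by
  induction xs with
  | nil => intro s; simp [PySem.List.enumerate_cons]
  | cons x t ih =>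
    intro s
    simp only [List.cons_append, PySem.List.enumerate_cons, ih (s + 1), List.length_cons]
    have h : s + 1 + (t.length : Int) = s + ((t.length : Int) + 1) := by ring
    rw [h]
    push_cast
    ring_nf

-- B's dict-building loop, characterised: items = enumerate of the payload list from 1
theorem pvBuild_items (lines : List String) :
    ∀ (pre : List String),
      (lines.foldl
        (fun (d : PySem.Dict Int String) line =>
          if PySem.Str.startswith line "[FFNAME]=" then
            d.insert ((d.size : Int) + 1) (PySem.Str.slice line (some 9) (some (-1)))
          else d)
        (PySem.Dict.mk (PySem.List.enumerate pre 1))) =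
      PySem.Dict.mk (PySem.List.enumerate (pre ++ (lines.filter pvIsFF).map pvPayload) 1) := by
  induction lines with
  | nil => intro pre; simp
  | cons l ls ih =>
    intro pre
    rw [List.foldl_cons, List.filter_cons]
    by_cases h1 : pvIsFF l
    · have hb : PySem.Str.startswith l "[FFNAME]=" = true := by rw [← pvCond_eq]; exact h1
      simp only [hb, if_true, h1, List.map_cons]
      have hsize : (PySem.Dict.mk (PySem.List.enumerate pre 1)).size = pre.length := by
        simp [PySem.Dict.size, PySem.List.length_enumerate]
      have hnc : (PySem.Dict.mk (PySem.List.enumerate pre 1)).contains ((pre.length : Int) + 1) = false := by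
        rw [PySem.Dict.contains_eq_decide_mem_keys]
        simp only [decide_eq_false_iff_not]
        intro hmem
        have h2 : (pre.length : Int) + 1 ∈ (PySem.List.enumerate pre 1).map (·.1) := by
          simpa [PySem.Dict.keys] using hmem
        rw [PySem.List.map_fst_enumerate, PySem.List.mem_pyRange_one] at h2
        omega
      have hins : (PySem.Dict.mk (PySem.List.enumerate pre 1)).insert
            (((PySem.Dict.mk (PySem.List.enumerate pre 1)).size : Int) + 1)
            (PySem.Str.slice l (some 9) (some (-1)))
          = PySem.Dict.mk (PySem.List.enumerate (pre ++ [PySem.Str.slice l (some 9) (some (-1))]) 1) := by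
        apply PySem.Dict.ext
        rw [hsize]
        rw [PySem.Dict.items_insert_of_not_contains]
        rw [pvEnum_snoc]
        have h3 : (1 : Int) + pre.length = (pre.length : Int) + 1 := by ring
        rw [h3]
        exact hnc
      rw [hins, ih (pre ++ [PySem.Str.slice l (some 9) (some (-1))])]
      simp [pvPayload]
    · have hb : PySem.Str.startswith l "[FFNAME]=" = false := by
        rw [← pvCond_eq]; simpa using h1
      simp only [hb, Bool.false_eq_true, if_false, h1]
      exact ih pre

-- page numbers below the first index of the table are absent from the dict
theorem pvGet_enum_none (ffs : List String) :
    ∀ (n p : Int), p < n →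
      (PySem.Dict.mk (PySem.List.enumerate ffs n)).get? p = none := by
  induction ffs with
  | nil => intro n p h; rfl
  | cons v rest ih =>
    intro n p h
    rw [PySem.List.enumerate_cons, PySem.Dict.get?_mk_cons]
    have : (n == p) = false := by simp; omega
    rw [this]
    simp only [Bool.false_eq_true, if_false]
    exact ih (n+1) p (by omega)

-- selecting along a strictly increasing list pulls out the head entry in front
theorem pvSelect (g : Int → Option String) (v : String) (n : Int)
    (hg : ∀ p, p ≤ n → g p = none) :
    ∀ (L : List Int), L.Pairwise (· < ·) →
      L.filterMap (fun p => if n == p then some v else g p)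
        = (if n ∈ L then [v] else []) ++ L.filterMap g := by
  intro L hL
  induction L with
  | nil => simp
  | cons a t ih =>
    rw [List.pairwise_cons] at hL
    obtain ⟨ha, ht⟩ := hL
    by_cases han : n = a
    · subst han
      have hgn : g n = none := hg n le_rfl
      have hthis : t.filterMap (fun p => if n == p then some v else g p) = t.filterMap g := by
        apply List.filterMap_congr
        intro p hp
        have h1 : n < p := ha p hp
        have h2 : (n == p) = false := by simp; omega
        simp [h2]
      simp only [List.filterMap_cons, beq_self_eq_true, if_true, hgn, List.mem_cons, true_or,
        if_true]
      simpa using hthis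
    · have hne : (n == a) = false := by simp [han]
      simp only [List.filterMap_cons, hne, Bool.false_eq_true, if_false, List.mem_cons]
      by_cases hmem : n ∈ t
      · have hlt : a < n := ha n hmem
        have hga : g a = none := hg a (by omega)
        simp only [hga, hmem, or_true, if_true]
        rw [ih ht]
        simp [hmem]
      · rw [ih ht]
        simp [hmem, han]

-- the order swap: lookups along a strictly increasing page list = scan of the table
theorem pvMain (L : List Int) (hL : L.Pairwise (· < ·)) :
    ∀ (ffs : List String) (n : Int),
      L.filterMap (fun p => (PySem.Dict.mk (PySem.List.enumerate ffs n)).get? p)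
        = (PySem.List.enumerate ffs n).filterMap
            (fun q => if q.1 ∈ L then some q.2 else none) := by
  intro ffs
  induction ffs with
  | nil =>
    intro n
    simp [PySem.List.enumerate_nil]
    intro p hp
    rfl
  | cons v rest ih =>
    intro n
    have hstep : (fun p => (PySem.Dict.mk (PySem.List.enumerate (v :: rest) n)).get? p)
        = fun p => if n == p then some v else (PySem.Dict.mk (PySem.List.enumerate rest (n+1))).get? p := by
      funext p
      rw [PySem.List.enumerate_cons, PySem.Dict.get?_mk_cons]
    rw [hstep, pvSelect _ v n (fun p hp => pvGet_enum_none rest (n+1) p (by omega)) L hL,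
      ih (n+1), PySem.List.enumerate_cons, List.filterMap_cons]
    by_cases hmem : n ∈ L
    · simp [hmem]
    · simp [hmem]

-- B in A's vocabulary
theorem pvAlt_eq (lines : List String) (page_ranges : List Int) :
    get_images_name_alt lines page_ranges =
      if page_ranges = [] then (lines.filter pvIsFF).map pvPayload
      else (PySem.List.enumerate ((lines.filter pvIsFF).map pvPayload) 1).filterMap
            (fun p => if page_ranges.contains p.1 then some p.2 else none) := by
  have hbuild :
      (lines.foldl
        (fun (d : PySem.Dict Int String) line =>
          if PySem.Str.startswith line "[FFNAME]=" then
            d.insert ((d.size : Int) + 1) (PySem.Str.slice line (some 9) (some (-1)))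
          else d)
        PySem.Dict.empty) =
      PySem.Dict.mk (PySem.List.enumerate ((lines.filter pvIsFF).map pvPayload) 1) := by
    simpa using pvBuild_items lines []
  unfold get_images_name_alt
  rw [hbuild]
  by_cases h : page_ranges = []
  · simp only [h, if_true]
    simp [PySem.Dict.values, PySem.List.map_snd_enumerate]
  · have hb : (page_ranges == []) = false := by simp [h]
    simp only [hb, Bool.false_eq_true, if_false, h]
    rw [pvMain _ (PySem.List.sorted_ofList_pairwise_lt page_ranges)]
    apply List.filterMap_congr
    intro q hq
    have hmem_iff : (q.1 ∈ PySem.List.sorted (PySem.Set.ofList page_ranges) (fun x => x) false)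
        ↔ page_ranges.contains q.1 = true := by
      rw [PySem.List.mem_sorted, PySem.Set.mem_ofList]
      simp
    by_cases hm : page_ranges.contains q.1 = true
    · simp [hmem_iff.mpr hm, show q.1 ∈ page_ranges by simpa using hm]
    · have h2 : ¬ (q.1 ∈ PySem.List.sorted (PySem.Set.ofList page_ranges) (fun x => x) false) :=
        fun c => hm (hmem_iff.mp c)
      simp [h2, show ¬ q.1 ∈ page_ranges by simpa using hm]

-- ===== VERDICT (by name: the statement is the Claim_ definition above) =====
theorem get_images_name_spec : Claim_equal_get_images_name := by
  intro lines page_ranges _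
  unfold Spec_get_images_name
  unfold get_images_name
  rw [pvFoldl_eq_go page_ranges lines [] 1, List.nil_append, pvAlt_eq]
  by_cases h : page_ranges = []
  · rw [if_pos h]
    exact pvGo_empty page_ranges h lines 1
  · rw [if_neg h]
    exact pvGo_nonempty page_ranges h lines 1
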